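-- pv_equiv track=rewrite | github.com/adsdeworst/USACO_CSES_CF_PROBLEMS | USACO_Problems/cow_college/testing_cow_college.py | get_max_revenue
-- ===== SOURCE A (Python) =====
-- def get_max_revenue(num_of_cows, each_cow_willing_pay):
--     max = 0
--     pay = 0
--     for i in range(num_of_cows):
--         curr_max, curr_pay = get_max_and_count(each_cow_willing_pay, i, num_of_cows)
--         if curr_max > max:
--             max, pay = curr_max, curr_pay
--
--     return str(max), str(pay)
--
-- def get_max_and_count(my_list, index, num_of_cows):
--     return (num_of_cows-index)*index, my_list[index]
-- ===== SOURCE B (Python) =====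
-- def get_max_revenue(num_of_cows, each_cow_willing_pay):
--     # (n-i)*i is a parabola in i peaked at i = n//2 (first argmax under strict '>').
--     if num_of_cows >= 2:
--         i = num_of_cows // 2
--         return str((num_of_cows - i) * i), str(each_cow_willing_pay[i])
--     return "0", "0"
-- ===== Notes on version B (the rewrite author's own statement) =====
-- stated objective: faster
-- what changed: Replaces the O(n) scan maximizing (n-i)*i with the closed-form parabola peak i = n//2 (the first argmax under strict '>'), reading a single list element.
import Mathlib
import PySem

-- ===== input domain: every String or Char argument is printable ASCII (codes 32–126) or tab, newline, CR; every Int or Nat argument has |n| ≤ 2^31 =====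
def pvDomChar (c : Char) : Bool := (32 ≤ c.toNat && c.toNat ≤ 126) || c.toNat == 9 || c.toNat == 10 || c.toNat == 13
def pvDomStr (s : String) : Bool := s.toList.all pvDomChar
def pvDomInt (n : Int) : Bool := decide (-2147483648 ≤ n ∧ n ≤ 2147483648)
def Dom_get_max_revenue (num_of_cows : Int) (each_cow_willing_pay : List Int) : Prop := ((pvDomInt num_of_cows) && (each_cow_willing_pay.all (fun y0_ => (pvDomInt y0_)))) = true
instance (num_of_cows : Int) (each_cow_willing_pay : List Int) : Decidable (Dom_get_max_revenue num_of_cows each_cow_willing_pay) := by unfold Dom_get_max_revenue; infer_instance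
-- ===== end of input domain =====

-- B replaces A's O(n) scan maximizing (n-i)*i by the closed-form parabola peak i = n//2 (O(1)).


-- ===== PORT A =====
-- helper get_max_and_count; my_list[index] ported with pyGetD 0 (out-of-range = IndexError, excluded by Pre_)
def get_max_and_count (my_list : List Int) (index : Int) (num_of_cows : Int) : Int × Int :=
  ((num_of_cows - index) * index, PySem.List.pyGetD my_list index 0)

def get_max_revenue (num_of_cows : Int) (each_cow_willing_pay : List Int) : String × String :=
  let st := (PySem.List.pyRange 0 num_of_cows 1).foldl
    (fun (s : Int × Int) i =>
      let c := get_max_and_count each_cow_willing_pay i num_of_cows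
      if c.1 > s.1 then c else s) (0, 0)
  (PySem.Int.toStr st.1, PySem.Int.toStr st.2)

-- ===== PORT B =====
def get_max_revenue_alt (num_of_cows : Int) (each_cow_willing_pay : List Int) : String × String :=
  if 2 ≤ num_of_cows then
    let i := PySem.Int.floordiv num_of_cows 2
    (PySem.Int.toStr ((num_of_cows - i) * i),
     PySem.Int.toStr (PySem.List.pyGetD each_cow_willing_pay i 0))
  else ("0", "0")

-- ===== PRECONDITION & SPEC =====
-- A raises IndexError iff it reads an index ≥ len, i.e. iff num_of_cows > len(each_cow_willing_pay).
def Pre_get_max_revenue (num_of_cows : Int) (each_cow_willing_pay : List Int) : Prop :=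
  num_of_cows ≤ each_cow_willing_pay.length
instance (num_of_cows : Int) (each_cow_willing_pay : List Int) : Decidable (Pre_get_max_revenue num_of_cows each_cow_willing_pay) := by unfold Pre_get_max_revenue; infer_instance
def pvWitness_get_max_revenue : Int × List Int := (3, [5, 6, 7])

def Spec_get_max_revenue (num_of_cows : Int) (each_cow_willing_pay : List Int) (out : String × String) : Prop := out = get_max_revenue_alt num_of_cows each_cow_willing_pay
instance (num_of_cows : Int) (each_cow_willing_pay : List Int) (out : String × String) : Decidable (Spec_get_max_revenue num_of_cows each_cow_willing_pay out) := by unfold Spec_get_max_revenue; infer_instance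

-- ===== CLAIM (what is proved, stated in full; the proofs are below) =====
def Claim_equal_get_max_revenue : Prop := ∀ (num_of_cows : Int) (each_cow_willing_pay : List Int), Dom_get_max_revenue num_of_cows each_cow_willing_pay → Pre_get_max_revenue num_of_cows each_cow_willing_pay → Spec_get_max_revenue num_of_cows each_cow_willing_pay (get_max_revenue num_of_cows each_cow_willing_pay)

-- ===== LEMMAS AND PROOFS =====

-- A's loop body
def pvStep (N : Int) (xs : List Int) (s : Int × Int) (i : Int) : Int × Int :=
  let c := get_max_and_count xs i N
  if c.1 > s.1 then c else s

-- Invariant: after processing i = 0 .. j-1 (j ≤ N), the state is the first argmax so far.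
lemma pvLoopA (N : Int) (xs : List Int) (j : Nat) (hj : (j : Int) ≤ N) :
    (PySem.List.pyRange 0 (j : Int) 1).foldl (pvStep N xs) (0, 0) =
      if 2 ≤ (j : Int) then
        let m := min ((j : Int) - 1) (N / 2)
        ((N - m) * m, PySem.List.pyGetD xs m 0)
      else (0, 0) := by
  induction j with
  | zero => simp
  | succ j ih =>
    have hj' : (j : Int) ≤ N := by push_cast at hj ⊢; omega
    have hsr : (PySem.List.pyRange 0 ((j : Int) + 1) 1)
        = PySem.List.pyRange 0 (j : Int) 1 ++ [(j : Int)] :=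
      PySem.List.pyRange_one_succ_right (by positivity)
    push_cast
    rw [hsr, List.foldl_append, ih hj']
    have hdiv : 2 * (N / 2) ≤ N ∧ N ≤ 2 * (N / 2) + 1 := by omega
    by_cases h2 : 2 ≤ (j : Int)
    · -- previous state is the argmax over 0..j-1
      simp only [if_pos h2]
      have h2' : 2 ≤ (j : Int) + 1 := by omega
      simp only [List.foldl, pvStep, get_max_and_count, if_pos h2']
      set h := N / 2 with hh
      by_cases hm : (j : Int) - 1 < h
      · -- still climbing: i = j beats the previous best
        have hmin : min ((j : Int) - 1) h = (j : Int) - 1 := by omega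
        have hmin' : min ((j : Int)) h = (j : Int) := by omega
        have hgt : (N - (j : Int)) * (j : Int) > (N - ((j : Int) - 1)) * ((j : Int) - 1) := by
          nlinarith [hdiv.1, hdiv.2]
        simp only [hmin]
        rw [if_pos (by simpa using hgt)]
        have e : (↑j : Int) + 1 - 1 = ↑j := by ring
        rw [e, hmin']
      · -- past the peak: previous best (at h) is not beaten
        have hmin : min ((j : Int) - 1) h = h := by omega
        have hmin' : min ((j : Int)) h = h := by omega
        have hle : (N - (j : Int)) * (j : Int) ≤ (N - h) * h := by
          have key : (N - h) * h - (N - (j : Int)) * (j : Int)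
              = ((j : Int) - h) * ((j : Int) + h - N) := by ring
          have : 0 ≤ ((j : Int) - h) * ((j : Int) + h - N) :=
            mul_nonneg (by omega) (by omega)
          linarith
        simp only [hmin]
        rw [if_neg (by simpa using not_lt.mpr hle)]
        have e : (↑j : Int) + 1 - 1 = ↑j := by ring
        rw [e, hmin']
    · -- j ≤ 1: previous state is (0,0)
      simp only [if_neg h2]
      have hj01 : j = 0 ∨ j = 1 := by omega
      rcases hj01 with rfl | rfl
      · -- j = 0: (N-0)*0 = 0 is not > 0
        simp [pvStep, get_max_and_count]
      · -- j = 1: (N-1)*1 = N-1 > 0 since N ≥ 2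
        have hN : 2 ≤ N := by omega
        have hmin : min (1 : Int) (N / 2) = 1 := by omega
        simp only [List.foldl, pvStep, get_max_and_count]
        rw [if_pos (by simp; omega), if_pos (by norm_num)]
        push_cast
        rw [hmin]

-- ===== VERDICT (by name: the statement is the Claim_ definition above) =====
theorem get_max_revenue_spec : Claim_equal_get_max_revenue := by
  intro N xs _ _
  unfold Spec_get_max_revenue get_max_revenue get_max_revenue_alt
  rw [PySem.Int.floordiv_eq_ediv_of_pos (by norm_num)]
  by_cases hN : 2 ≤ N
  · have hNn : ((N.toNat : Int)) = N := Int.toNat_of_nonneg (by omega)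
    have := pvLoopA N xs N.toNat (by omega)
    rw [hNn] at this
    have hmin : min (N - 1) (N / 2) = N / 2 := by omega
    rw [show (PySem.List.pyRange 0 N 1).foldl (pvStep N xs) (0, 0)
          = (PySem.List.pyRange 0 N 1).foldl
              (fun (s : Int × Int) i =>
                let c := get_max_and_count xs i N
                if c.1 > s.1 then c else s) (0, 0) from rfl] at this
    simp only [this, if_pos hN, hmin]
  · -- N ≤ 1: the loop never updates (0,0)
    by_cases hN0 : N ≤ 0
    · rw [PySem.List.pyRange_one_eq_nil hN0]
      simp only [List.foldl, if_neg hN]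
      decide
    · have hN1 : N = 1 := by omega
      subst hN1
      have hr : PySem.List.pyRange 0 1 1 = [0] := by decide
      rw [hr]
      simp only [List.foldl, get_max_and_count, if_neg hN]
      norm_num
      decide
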